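-- pv_equiv track=rewrite | github.com/lamperi/aoc | 2015/18/solve.py | update_corners
-- ===== SOURCE A (Python) =====
-- def update_corners(grid):
--     new_grid = []
--     for x in range(len(grid)):
--         l = []
--         for y in range(len(grid[x])):
--             if x in (0, len(grid)-1) and y in (0, len(grid[x])-1):
--                 l.append('#')
--             else: # pass
--                 l.append(grid[x][y])
--         new_grid.append("".join(l))
--     return new_grid
-- ===== SOURCE B (Python) =====
-- def update_corners(grid):
--     new_grid = list(grid)
--     if grid:
--         for x in {0, len(grid) - 1}:
--             row = grid[x]
--             if row:
--                 cells = list(row)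
--                 cells[0] = '#'
--                 cells[-1] = '#'
--                 new_grid[x] = "".join(cells)
--     return new_grid
-- ===== Notes on version B (the rewrite author's own statement) =====
-- stated objective: simpler
-- what changed: B shallow-copies the row list and patches only the first and last rows (setting their first and last characters to '#'), instead of A's nested loops rebuilding every row character by character.
import Mathlib
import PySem

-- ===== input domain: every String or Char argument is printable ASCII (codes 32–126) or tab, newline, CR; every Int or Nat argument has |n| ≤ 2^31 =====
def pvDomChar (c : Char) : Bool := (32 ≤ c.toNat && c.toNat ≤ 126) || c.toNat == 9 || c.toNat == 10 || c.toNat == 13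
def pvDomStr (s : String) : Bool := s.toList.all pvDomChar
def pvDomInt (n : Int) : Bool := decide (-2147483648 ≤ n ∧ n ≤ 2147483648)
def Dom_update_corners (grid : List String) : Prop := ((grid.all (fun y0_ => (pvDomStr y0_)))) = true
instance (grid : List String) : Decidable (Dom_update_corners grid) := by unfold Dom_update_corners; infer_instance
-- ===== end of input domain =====

-- B patches only the corner rows of a shallow copy instead of rebuilding every cell (simpler decomposition).

-- ===== PORT A =====
def update_corners (grid : List String) : List String :=
  (List.range grid.length).foldl (fun new_grid x =>
    let gx := (grid.getD x "").toList
    let l := (List.range gx.length).foldl (fun l y =>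
      if (x = 0 ∨ x = grid.length - 1) ∧ (y = 0 ∨ y = gx.length - 1) then
        l ++ ['#']
      else
        l ++ [gx.getD y ' ']) ([] : List Char)
    new_grid ++ [String.ofList l]) []

-- ===== PORT B =====
-- 'if row: cells = list(row); cells[0] = '#'; cells[-1] = '#'; row = "".join(cells)'
def pvPatchRow (s : String) : String :=
  match s.toList with
  | [] => s
  | [_] => "#"
  | _ :: rest => String.ofList ('#' :: (rest.dropLast ++ ['#']))

def update_corners_alt (grid : List String) : List String :=
  match grid with
  | [] => []
  | h :: t =>
    let g1 := pvPatchRow h :: t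
    if t = [] then g1
    else g1.set (g1.length - 1) (pvPatchRow (g1.getD (g1.length - 1) ""))

-- ===== PRECONDITION & SPEC =====
def Spec_update_corners (grid : List String) (out : List String) : Prop := out = update_corners_alt grid
instance (grid : List String) (out : List String) : Decidable (Spec_update_corners grid out) := by unfold Spec_update_corners; infer_instance

-- ===== CLAIM (what is proved, stated in full; the proofs are below) =====
def Claim_equal_update_corners : Prop := ∀ (grid : List String), Dom_update_corners grid → Spec_update_corners grid (update_corners grid)

-- ===== LEMMAS AND PROOFS =====

-- inner loop of A, as a map over the row's indices
def pvRow (n : ℕ) (x : ℕ) (gx : List Char) : List Char :=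
  (List.range gx.length).map (fun y =>
    if (x = 0 ∨ x = n - 1) ∧ (y = 0 ∨ y = gx.length - 1) then '#' else gx.getD y ' ')

lemma pv_ite_append (c : Prop) [Decidable c] (l : List Char) (a b : Char) :
    (if c then l ++ [a] else l ++ [b]) = l ++ [if c then a else b] := by
  split <;> rfl

lemma update_corners_eq_map (grid : List String) :
    update_corners grid =
      (List.range grid.length).map (fun x => String.ofList (pvRow grid.length x (grid.getD x "").toList)) := by
  simp only [update_corners, pv_ite_append, PySem.List.foldl_append_singleton_eq_map, pvRow]
  simp

-- a non-corner row is rebuilt unchanged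
lemma pvRow_noncorner (n x : ℕ) (gx : List Char) (hx : ¬ (x = 0 ∨ x = n - 1)) :
    pvRow n x gx = gx := by
  apply List.ext_getElem (by simp [pvRow])
  intro i h1 h2
  simp [pvRow, hx, List.getD_eq_getElem?_getD, List.getElem?_eq_getElem h2]

-- a corner row is rebuilt as its patched version
lemma pvRow_corner (n x : ℕ) (gx : List Char) (hx : x = 0 ∨ x = n - 1) :
    pvRow n x gx = (pvPatchRow (String.ofList gx)).toList := by
  match gx with
  | [] => simp [pvRow, pvPatchRow]
  | [c] => simp [pvRow, pvPatchRow, hx]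
  | a :: b :: rest =>
    have hpatch : (pvPatchRow (String.ofList (a :: b :: rest))).toList
        = '#' :: ((b :: rest).dropLast ++ ['#']) := by
      simp [pvPatchRow]
    rw [hpatch]
    apply List.ext_getElem (by simp [pvRow])
    intro i h1 h2
    simp only [pvRow, List.length_map, List.length_range] at h1
    simp only [pvRow, List.getElem_map, List.getElem_range]
    by_cases h0 : i = 0
    · subst h0; simp [hx]
    · obtain ⟨j, rfl⟩ : ∃ j, i = j + 1 := ⟨i - 1, by omega⟩
      rw [List.getElem_cons_succ]
      have hj : j + 1 < rest.length + 2 := by simpa using h1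
      by_cases hl : j + 1 = rest.length + 1
      · rw [hl]
        rw [if_pos ⟨hx, Or.inr (by simp)⟩]
        rw [List.getElem_append_right (by simp; omega)]
        simp
      · rw [if_neg (by simp; omega)]
        rw [List.getElem_append_left (by simp; omega)]
        rw [List.getElem_dropLast]
        rw [List.getD_eq_getElem _ _ (by simpa using h1)]
        rw [List.getElem_cons_succ]

-- ===== VERDICT (by name: the statement is the Claim_ definition above) =====
theorem update_corners_spec : Claim_equal_update_corners := by
  intro grid _
  unfold Spec_update_corners
  rw [update_corners_eq_map]
  match grid with
  | [] => simp [update_corners_alt]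
  | [h] =>
    have hc : pvRow 1 0 h.toList = (pvPatchRow (String.ofList h.toList)).toList :=
      pvRow_corner 1 0 _ (Or.inl rfl)
    simp [update_corners_alt, hc, String.ofList_toList]
  | h :: b :: t' =>
    have ht : (b :: t') ≠ [] := by simp
    simp only [update_corners_alt, if_neg ht]
    apply List.ext_getElem (by simp)
    intro i hA hB
    simp only [List.length_map, List.length_range] at hA
    rw [List.getElem_map, List.getElem_range]
    rw [List.getElem_set]
    by_cases hl : i = t'.length + 1
    · subst hl
      rw [if_pos (by simp)]
      rw [pvRow_corner _ _ _ (Or.inr (by simp))]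
      simp [String.ofList_toList]
    · rw [if_neg (by simp; omega)]
      by_cases h0 : i = 0
      · subst h0
        rw [pvRow_corner _ 0 _ (Or.inl rfl)]
        simp only [String.ofList_toList]
        simp
      · rw [pvRow_noncorner _ i _ (by simp [h0]; omega), String.ofList_toList]
        obtain ⟨j, rfl⟩ : ∃ j, i = j + 1 := ⟨i - 1, by omega⟩
        simp only [List.getD_cons_succ, List.getElem_cons_succ]
        rw [List.getD_eq_getElem _ _ (by simp at hA ⊢; omega)]
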